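-- pv_equiv track=rewrite | github.com/wmcz/nkcr_catmandu | tools.py | make_qid_database
-- ===== SOURCE A (Python) =====
-- def make_qid_database(items: dict) -> dict[str, list[str]]:
--     """
--     Creates a database mapping QIDs to lists of NKCR identifiers. This function takes
--     a dictionary where each key is an NKCR identifier, and each value is a dictionary
--     containing at least a 'qid' key. It processes these entries to create a new
--     dictionary where each QID is a key mapped to a list of NKCR identifiers associated
--     with that QID.
--
--     :param items: A dictionary mapping NKCR identifiers to dictionaries. Each
--         dictionary value must contain a 'qid' key which provides the QID
--         associated with the NKCR identifier.
--     :type items: dict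
--
--     :return: A dictionary where each QID is mapped to a list of NKCR identifiers
--         that share the same QID.
--     :rtype: dict[str, list[str]]
--     """
--     return_qids: dict[str, list[str]] = {}
--     for nkcr, nkcr_line in items.items():
--         if return_qids.get(nkcr_line['qid']):
--             return_qids[nkcr_line['qid']].append(nkcr)
--         else:
--             return_qids[nkcr_line['qid']] = [nkcr]
--
--     return return_qids
-- ===== SOURCE B (Python) =====
-- def make_qid_database(items: dict) -> dict[str, list[str]]:
--     qids = list(dict.fromkeys(line['qid'] for line in items.values()))
--     return {q: [nkcr for nkcr, line in items.items() if line['qid'] == q]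
--             for q in qids}
-- ===== Notes on version B (the rewrite author's own statement) =====
-- stated objective: idiomatic
-- what changed: A builds the grouping incrementally with get/append/insert on a mutable dict; B first dedups the qids in first-occurrence order and then builds each group in one comprehension by filtering the items for that qid.
import Mathlib
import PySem

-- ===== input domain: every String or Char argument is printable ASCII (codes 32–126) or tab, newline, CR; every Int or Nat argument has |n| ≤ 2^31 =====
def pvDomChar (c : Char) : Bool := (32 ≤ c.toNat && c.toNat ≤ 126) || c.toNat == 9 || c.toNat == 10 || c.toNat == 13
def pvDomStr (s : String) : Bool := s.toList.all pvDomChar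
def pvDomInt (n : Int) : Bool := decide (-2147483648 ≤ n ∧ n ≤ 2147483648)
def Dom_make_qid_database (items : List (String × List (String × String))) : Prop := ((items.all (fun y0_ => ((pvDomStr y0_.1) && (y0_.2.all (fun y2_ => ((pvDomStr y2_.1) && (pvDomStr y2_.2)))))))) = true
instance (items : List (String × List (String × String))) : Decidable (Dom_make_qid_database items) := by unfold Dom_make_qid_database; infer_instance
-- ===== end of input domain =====

-- B is a more idiomatic re-implementation: dedup the qids in first-occurrence order,
-- then build each group by one filtering pass, instead of A's incremental mutable-dict build.

-- ===== PORT A =====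
-- nkcr_line['qid'] (none = KeyError, excluded by Pre_)
def pvQid (line : List (String × String)) : Option String :=
  (PySem.Dict.mk line).get? "qid"

-- the body of A's for-loop: get / truthiness test / append-or-insert
def pvStepA (acc : PySem.Dict String (List String)) (p : String × List (String × String)) :
    PySem.Dict String (List String) :=
  match pvQid p.2 with
  | none => acc   -- unreachable under Pre_ (Python raises KeyError here)
  | some q =>
    match acc.get? q with
    | some l => if l.isEmpty then acc.insert q [p.1] else acc.insert q (l ++ [p.1])
    | none => acc.insert q [p.1]

def make_qid_database (items : List (String × List (String × String))) : List (String × List String) :=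
  (items.foldl pvStepA PySem.Dict.empty).items

-- ===== PORT B =====
def make_qid_database_alt (items : List (String × List (String × String))) : List (String × List String) :=
  let qids := PySem.List.dedup (items.filterMap (fun p => pvQid p.2))
  qids.map (fun q => (q, (items.filter (fun p => pvQid p.2 == some q)).map (·.1)))

-- ===== PRECONDITION & SPEC =====
-- Pre_ excludes exactly the inputs where some value dict lacks the key 'qid': there Python A raises KeyError.
def Pre_make_qid_database (items : List (String × List (String × String))) : Prop :=
  ∀ p ∈ items, ((PySem.Dict.mk p.2).get? "qid").isSome = true
instance (items : List (String × List (String × String))) : Decidable (Pre_make_qid_database items) := by unfold Pre_make_qid_database; infer_instance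

def pvWitness_make_qid_database : (List (String × List (String × String))) :=
  [("nk1", [("qid", "Q1")]), ("nk2", [("qid", "Q2")]), ("nk3", [("qid", "Q1")])]

def Spec_make_qid_database (items : List (String × List (String × String))) (out : List (String × List String)) : Prop := out = make_qid_database_alt items
instance (items : List (String × List (String × String))) (out : List (String × List String)) : Decidable (Spec_make_qid_database items out) := by unfold Spec_make_qid_database; infer_instance

-- ===== CLAIM (what is proved, stated in full; the proofs are below) =====
def Claim_equal_make_qid_database : Prop := ∀ (items : List (String × List (String × String))), Dom_make_qid_database items → Pre_make_qid_database items → Spec_make_qid_database items (make_qid_database items)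

-- ===== LEMMAS AND PROOFS =====

-- under Pre_, the key of an item (total form used by the proof)
def pvKey (p : String × List (String × String)) : String := (pvQid p.2).getD ""

-- Under Pre_, A's loop body is exactly a `modify` with default [] and append.
theorem pvStepA_eq_modify (acc : PySem.Dict String (List String))
    (p : String × List (String × String)) (h : (pvQid p.2).isSome = true) :
    pvStepA acc p = acc.modify (pvKey p) [] (· ++ [p.1]) := by
  obtain ⟨q, hq⟩ := Option.isSome_iff_exists.mp h
  simp only [pvStepA, pvKey, hq, Option.getD_some, PySem.Dict.modify,
    PySem.Dict.getD_eq_get?_getD]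
  cases hg : acc.get? q with
  | none => simp
  | some l =>
    cases l with
    | nil => simp
    | cons a t => simp

-- under Pre_, every item's qid is `some (pvKey p)`, so filterMap collapses to map
theorem pvFilterMap_eq_map (items : List (String × List (String × String)))
    (hpre : Pre_make_qid_database items) :
    items.filterMap (fun p => pvQid p.2) = items.map pvKey := by
  induction items with
  | nil => rfl
  | cons p t ih =>
    obtain ⟨q, hq⟩ := Option.isSome_iff_exists.mp (hpre p (by simp))
    have hq' : pvQid p.2 = some q := hq
    rw [List.filterMap_cons, hq', List.map_cons, ih (fun x hx => hpre x (by simp [hx]))]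
    simp [pvKey, hq']

theorem make_qid_database_spec' (items : List (String × List (String × String)))
    (hpre : Pre_make_qid_database items) :
    make_qid_database items = make_qid_database_alt items := by
  unfold make_qid_database make_qid_database_alt
  -- replace A's loop body by the modify form (valid on every member under Pre_)
  have hcong : List.foldl pvStepA PySem.Dict.empty items
      = List.foldl (fun acc p => acc.modify (pvKey p) [] (· ++ [p.1])) PySem.Dict.empty items :=
    PySem.List.foldl_congr_mem items pvStepA _ PySem.Dict.empty (fun acc p hp => pvStepA_eq_modify acc p (hpre p hp))
  rw [hcong]
  -- view the modify loop as a loop over (key, value) pairs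
  have hmap : items.foldl (fun acc p => acc.modify (pvKey p) [] (· ++ [p.1])) PySem.Dict.empty
      = (items.map (fun p => (pvKey p, p.1))).foldl
          (fun d pr => d.modify pr.1 [] (· ++ [pr.2])) PySem.Dict.empty := by
    rw [List.foldl_map]
  rw [hmap]
  set l' := items.map (fun p => (pvKey p, p.1)) with hl'
  set D := l'.foldl (fun d pr => d.modify pr.1 [] (· ++ [pr.2])) PySem.Dict.empty with hD
  have hnodup : D.keys.Nodup := by
    rw [hD]
    exact PySem.Dict.nodup_keys_foldl_modify_key l' (fun pr => pr.1) [] (fun d pr => (· ++ [pr.2]))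
      PySem.Dict.empty (by simp)
  have hkeys : D.keys = PySem.Set.ofList (items.map pvKey) := by
    rw [hD]
    have := PySem.Dict.keys_foldl_modify_key (l := l') (key := fun pr => pr.1)
      (d0 := []) (f := fun d pr => (· ++ [pr.2])) (d := PySem.Dict.empty)
    simp only [PySem.Dict.keys_empty] at this
    rw [this, PySem.Set.update_nil_left, hl', List.map_map]
    rfl
  -- items of D as a map over its keys
  rw [PySem.Dict.items_eq_map_keys D hnodup [], hkeys]
  -- the qid list of B is the same dedup list
  have hqids : PySem.List.dedup (items.filterMap (fun p => pvQid p.2))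
      = PySem.Set.ofList (items.map pvKey) := by
    rw [PySem.List.dedup_eq_ofList, pvFilterMap_eq_map items hpre]
  rw [hqids]
  -- pointwise: each group list agrees
  apply List.map_congr_left
  intro q hq
  have hval : D.getD q [] = (items.filter (fun p => pvQid p.2 == some q)).map (·.1) := by
    rw [hD, PySem.Dict.getD_foldl_modify_append, PySem.Dict.getD_empty]
    simp only [List.nil_append, hl']
    rw [List.filter_map, List.map_map]
    congr 1
    apply List.filter_congr
    intro p hp
    have hps : (pvQid p.2).isSome = true := hpre p hp
    obtain ⟨qp, hqp⟩ := Option.isSome_iff_exists.mp hps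
    simp [Function.comp, pvKey, hqp]
  rw [hval]

-- ===== VERDICT (by name: the statement is the Claim_ definition above) =====
theorem make_qid_database_spec : Claim_equal_make_qid_database := by
  intro items _ hpre
  exact make_qid_database_spec' items hpre
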